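-- pv_equiv track=rewrite | github.com/chahyoungseok/Algorithm | 백준/Gold/17472. 다리 만들기 2/다리 만들기 2.py | check_between
-- ===== SOURCE A (Python) =====
-- def check_between(islands, island1, island2, point_1, point_2) :
--     if point_1[0] == point_2[0] :
--         if point_2[1] > point_1[1] :
--             b, s = point_2[1], point_1[1]
--         else :
--             s, b = point_2[1], point_1[1]
--
--         for i in range(s + 1, b) :
--             for island in islands :
--                 if [point_1[0], i] in island :
--                     return False
--     elif point_1[1] == point_2[1] :
--         if point_2[0] > point_1[0] :
--             b, s = point_2[0], point_1[0]
--         else :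
--             s, b = point_2[0], point_1[0]
--
--         for i in range(s + 1, b) :
--             for island in islands:
--                 if [i, point_1[1]] in island :
--                     return False
--     return True
-- ===== SOURCE B (Python) =====
-- def check_between(islands, island1, island2, point_1, point_2):
--     # Sweep island cells once instead of enumerating intermediate points.
--     x1, y1 = point_1[0], point_1[1]
--     x2, y2 = point_2[0], point_2[1]
--     if x1 == x2:
--         s, b = min(y1, y2), max(y1, y2)
--         return not any(len(c) == 2 and c[0] == x1 and s < c[1] < b
--                        for isl in islands for c in isl)
--     if y1 == y2:
--         s, b = min(x1, x2), max(x1, x2)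
--         return not any(len(c) == 2 and c[1] == y1 and s < c[0] < b
--                        for isl in islands for c in isl)
--     return True
-- ===== Notes on version B (the rewrite author's own statement) =====
-- stated objective: alternative
-- what changed: Instead of enumerating every intermediate coordinate on the segment and probing list membership in every island for each, B sweeps each island cell once and tests whether it lies strictly between the endpoints on the shared row/column; cost trades O(dist*cells) point-probes for one O(cells) pass.
-- outside the precondition, e.g. on check_between([], 0, 1, [1], [1, 2]): A raises IndexError, B raises IndexError
import Mathlib
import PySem

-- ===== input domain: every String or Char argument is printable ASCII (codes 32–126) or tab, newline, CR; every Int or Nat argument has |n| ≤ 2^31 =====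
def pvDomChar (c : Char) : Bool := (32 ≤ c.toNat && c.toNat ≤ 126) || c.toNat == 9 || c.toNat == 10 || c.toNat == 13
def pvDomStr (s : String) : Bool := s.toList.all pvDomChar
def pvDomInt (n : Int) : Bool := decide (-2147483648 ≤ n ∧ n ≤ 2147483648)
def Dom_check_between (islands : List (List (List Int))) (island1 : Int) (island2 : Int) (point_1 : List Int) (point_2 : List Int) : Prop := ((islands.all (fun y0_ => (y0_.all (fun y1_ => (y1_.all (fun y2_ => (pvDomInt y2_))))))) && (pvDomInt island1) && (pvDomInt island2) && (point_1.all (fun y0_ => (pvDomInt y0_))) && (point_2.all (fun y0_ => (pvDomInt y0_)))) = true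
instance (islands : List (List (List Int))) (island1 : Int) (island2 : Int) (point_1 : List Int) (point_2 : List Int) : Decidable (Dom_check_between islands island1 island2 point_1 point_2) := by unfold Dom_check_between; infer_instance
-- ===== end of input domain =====

-- B replaces A's per-coordinate enumeration along the segment with one sweep over the island cells.

-- ===== PORT A =====
-- A's early-return double loop 'for i in range(s+1,b): for island in islands: if [..] in island: return False'
-- is ported as List.any over the same range and islands; '[x, i] in island' is island.contains [x, i].
def check_between (islands : List (List (List Int))) (island1 : Int) (island2 : Int) (point_1 : List Int) (point_2 : List Int) : Bool :=
  match PySem.List.pyGet? point_1 0, PySem.List.pyGet? point_2 0,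
        PySem.List.pyGet? point_1 1, PySem.List.pyGet? point_2 1 with
  | some x1, some x2, some y1, some y2 =>
      if x1 = x2 then
        let sb : Int × Int := if y2 > y1 then (y1, y2) else (y2, y1)
        !((PySem.List.pyRange (sb.1 + 1) sb.2 1).any (fun i =>
            islands.any (fun island => island.contains [x1, i])))
      else if y1 = y2 then
        let sb : Int × Int := if x2 > x1 then (x1, x2) else (x2, x1)
        !((PySem.List.pyRange (sb.1 + 1) sb.2 1).any (fun i =>
            islands.any (fun island => island.contains [i, y1])))
      else true
  | _, _, _, _ => true  -- IndexError in Python: excluded by Pre_check_between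

-- ===== PORT B =====
-- B's 'any(len(c) == 2 and c[0] == x1 and s < c[1] < b for isl in islands for c in isl)';
-- the len-2 check plus indexing is the match on the cell.
def check_between_alt (islands : List (List (List Int))) (island1 : Int) (island2 : Int) (point_1 : List Int) (point_2 : List Int) : Bool :=
  -- sequential unpacking x1,y1 = point_1[0],point_1[1]; x2,y2 = point_2[0],point_2[1];
  -- a missing coordinate is an IndexError in Python (excluded by Pre_check_between): none propagates, getD true is never reached inside Pre_.
  ((PySem.List.pyGet? point_1 0).bind fun x1 =>
   (PySem.List.pyGet? point_1 1).bind fun y1 =>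
   (PySem.List.pyGet? point_2 0).bind fun x2 =>
   (PySem.List.pyGet? point_2 1).map fun y2 =>
      if x1 = x2 then
        let s := min y1 y2
        let b := max y1 y2
        !(islands.any (fun isl => isl.any (fun c =>
            match c with
            | [cx, cy] => cx == x1 && decide (s < cy) && decide (cy < b)
            | _ => false)))
      else if y1 = y2 then
        let s := min x1 x2
        let b := max x1 x2
        !(islands.any (fun isl => isl.any (fun c =>
            match c with
            | [cx, cy] => cy == y1 && decide (s < cx) && decide (cx < b)
            | _ => false)))
      else true).getD true

-- ===== PRECONDITION & SPEC =====
-- A (and B) raise IndexError unless both points have at least two coordinates; Pre_ excludes exactly those inputs.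
def Pre_check_between (islands : List (List (List Int))) (island1 : Int) (island2 : Int) (point_1 : List Int) (point_2 : List Int) : Prop :=
  2 ≤ point_1.length ∧ 2 ≤ point_2.length
instance (islands : List (List (List Int))) (island1 : Int) (island2 : Int) (point_1 : List Int) (point_2 : List Int) : Decidable (Pre_check_between islands island1 island2 point_1 point_2) := by unfold Pre_check_between; infer_instance
def pvWitness_check_between : List (List (List Int)) × Int × Int × List Int × List Int :=
  ([[[0, 2]], [[5, 5]]], 0, 1, [0, 0], [0, 4])
def Spec_check_between (islands : List (List (List Int))) (island1 : Int) (island2 : Int) (point_1 : List Int) (point_2 : List Int) (out : Bool) : Prop := out = check_between_alt islands island1 island2 point_1 point_2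
instance (islands : List (List (List Int))) (island1 : Int) (island2 : Int) (point_1 : List Int) (point_2 : List Int) (out : Bool) : Decidable (Spec_check_between islands island1 island2 point_1 point_2 out) := by unfold Spec_check_between; infer_instance

-- ===== CLAIM (what is proved, stated in full; the proofs are below) =====
def Claim_equal_check_between : Prop := ∀ (islands : List (List (List Int))) (island1 : Int) (island2 : Int) (point_1 : List Int) (point_2 : List Int), Dom_check_between islands island1 island2 point_1 point_2 → Pre_check_between islands island1 island2 point_1 point_2 → Spec_check_between islands island1 island2 point_1 point_2 (check_between islands island1 island2 point_1 point_2)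

-- ===== LEMMAS AND PROOFS =====

-- The heart of the equivalence: enumerating the strictly-between coordinates and probing
-- membership equals one sweep over cells (vertical orientation; first coordinate fixed).
lemma sweep_v (islands : List (List (List Int))) (x s b : Int) :
    ((PySem.List.pyRange (s + 1) b 1).any (fun i =>
        islands.any (fun island => island.contains [x, i])))
    = islands.any (fun isl => isl.any (fun c =>
        match c with
        | [cx, cy] => cx == x && decide (s < cy) && decide (cy < b)
        | _ => false)) := by
  rw [Bool.eq_iff_iff]
  simp only [List.any_eq_true, PySem.List.mem_pyRange_one, List.contains_iff_mem]
  constructor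
  · rintro ⟨i, ⟨hle, hlt⟩, isl, hisl, hmem⟩
    refine ⟨isl, hisl, [x, i], hmem, ?_⟩
    simp only [beq_self_eq_true, Bool.true_and, Bool.and_eq_true, decide_eq_true_eq]
    omega
  · rintro ⟨isl, hisl, c, hc, hm⟩
    match c with
    | [cx, cy] =>
      simp only [Bool.and_eq_true, beq_iff_eq, decide_eq_true_eq] at hm
      obtain ⟨⟨rfl, h1⟩, h2⟩ := hm
      exact ⟨cy, ⟨by omega, h2⟩, isl, hisl, hc⟩

-- Horizontal orientation: second coordinate fixed.
lemma sweep_h (islands : List (List (List Int))) (y s b : Int) :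
    ((PySem.List.pyRange (s + 1) b 1).any (fun i =>
        islands.any (fun island => island.contains [i, y])))
    = islands.any (fun isl => isl.any (fun c =>
        match c with
        | [cx, cy] => cy == y && decide (s < cx) && decide (cx < b)
        | _ => false)) := by
  rw [Bool.eq_iff_iff]
  simp only [List.any_eq_true, PySem.List.mem_pyRange_one, List.contains_iff_mem]
  constructor
  · rintro ⟨i, ⟨hle, hlt⟩, isl, hisl, hmem⟩
    refine ⟨isl, hisl, [i, y], hmem, ?_⟩
    simp only [beq_self_eq_true, Bool.true_and, Bool.and_eq_true, decide_eq_true_eq]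
    omega
  · rintro ⟨isl, hisl, c, hc, hm⟩
    match c with
    | [cx, cy] =>
      simp only [Bool.and_eq_true, beq_iff_eq, decide_eq_true_eq] at hm
      obtain ⟨⟨rfl, h1⟩, h2⟩ := hm
      exact ⟨cx, ⟨by omega, h2⟩, isl, hisl, hc⟩

-- ===== VERDICT (by name: the statement is the Claim_ definition above) =====
theorem check_between_spec : Claim_equal_check_between := by
  intro islands island1 island2 point_1 point_2 _ hpre
  obtain ⟨h1, h2⟩ := hpre
  obtain ⟨a1, p1, h1'⟩ : ∃ a t, point_1 = a :: t := by
    cases point_1 with | nil => simp at h1 | cons a t => exact ⟨a, t, rfl⟩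
  obtain ⟨b1, q1, h1''⟩ : ∃ a t, p1 = a :: t := by
    subst h1'; cases p1 with | nil => simp at h1 | cons a t => exact ⟨a, t, rfl⟩
  obtain ⟨a2, p2, h2'⟩ : ∃ a t, point_2 = a :: t := by
    cases point_2 with | nil => simp at h2 | cons a t => exact ⟨a, t, rfl⟩
  obtain ⟨b2, q2, h2''⟩ : ∃ a t, p2 = a :: t := by
    subst h2'; cases p2 with | nil => simp at h2 | cons a t => exact ⟨a, t, rfl⟩
  subst h1'' h1' h2'' h2'
  unfold Spec_check_between check_between check_between_alt
  have g1 : PySem.List.pyGet? (a1::b1::q1) 0 = some a1 :=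
    PySem.List.pyGet?_zero_cons a1 (b1::q1)
  have g2 : PySem.List.pyGet? (a1::b1::q1) 1 = some b1 := by
    simp [PySem.List.pyGet?, PySem.List.pyIdx?]
  have g3 : PySem.List.pyGet? (a2::b2::q2) 0 = some a2 :=
    PySem.List.pyGet?_zero_cons a2 (b2::q2)
  have g4 : PySem.List.pyGet? (a2::b2::q2) 1 = some b2 := by
    simp [PySem.List.pyGet?, PySem.List.pyIdx?]
  rw [g1, g2, g3, g4]
  simp only [Option.bind_some, Option.map_some, Option.getD_some]
  by_cases hx : a1 = a2
  · rw [if_pos hx, if_pos hx]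
    by_cases hy : b2 > b1
    · rw [if_pos hy]
      dsimp only
      rw [sweep_v, show min b1 b2 = b1 by omega, show max b1 b2 = b2 by omega]
    · rw [if_neg hy]
      dsimp only
      rw [sweep_v, show min b1 b2 = b2 by omega, show max b1 b2 = b1 by omega]
  · rw [if_neg hx, if_neg hx]
    by_cases hy : b1 = b2
    · rw [if_pos hy, if_pos hy]
      by_cases hx2 : a2 > a1
      · rw [if_pos hx2]
        dsimp only
        rw [sweep_h, show min a1 a2 = a1 by omega, show max a1 a2 = a2 by omega]
      · rw [if_neg hx2]
        dsimp only
        rw [sweep_h, show min a1 a2 = a2 by omega, show max a1 a2 = a1 by omega]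
    · rw [if_neg hy, if_neg hy]
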